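-- pv_equiv track=rewrite | github.com/RadRSGroup/DPNR-Demo | agent-library/agent_library/orchestration/sefirot_orchestrator.py | _prioritize_guidance
-- ===== SOURCE A (Python) =====
-- from typing import Dict, List, Optional, Tuple, Any
--
-- def _prioritize_guidance(guidance: List[str]) -> List[str]:
--     """Prioritize and organize guidance from multiple sefirot"""
--     # Prioritize based on action words and practical focus
--     priority_words = ["start", "create", "establish", "practice", "implement"]
--
--     prioritized = []
--     remaining = []
--
--     for guide in guidance:
--         if any(word in guide.lower() for word in priority_words):
--             prioritized.append(guide)
--         else:
--             remaining.append(guide)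
--
--     # Return prioritized first, then others, limited to top 7
--     return (prioritized + remaining)[:7]
-- ===== SOURCE B (Python) =====
-- def _prioritize_guidance(guidance):
--     """Prioritize and organize guidance from multiple sefirot"""
--     priority_words = ["start", "create", "establish", "practice", "implement"]
--
--     def key(g):
--         s = g.lower()
--         return not any(w in s for w in priority_words)
--
--     # stable sort: priority items (key False) first in original order, then the rest
--     return sorted(guidance, key=key)[:7]
-- ===== Notes on version B (the rewrite author's own statement) =====
-- stated objective: idiomatic
-- what changed: Replaces the two-accumulator partition loop and concatenation with a single stable sort keyed on the priority predicate followed by a slice.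
import Mathlib
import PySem

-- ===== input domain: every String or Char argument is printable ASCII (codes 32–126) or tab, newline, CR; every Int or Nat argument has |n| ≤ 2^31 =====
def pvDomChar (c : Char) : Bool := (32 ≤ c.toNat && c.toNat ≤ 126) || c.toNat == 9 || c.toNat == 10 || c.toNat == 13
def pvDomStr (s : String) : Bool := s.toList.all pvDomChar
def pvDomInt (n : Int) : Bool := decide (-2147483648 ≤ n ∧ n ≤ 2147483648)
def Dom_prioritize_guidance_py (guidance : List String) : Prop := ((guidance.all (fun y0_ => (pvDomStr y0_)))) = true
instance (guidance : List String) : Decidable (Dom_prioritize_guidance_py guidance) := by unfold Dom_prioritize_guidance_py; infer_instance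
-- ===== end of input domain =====

-- B replaces A's two-accumulator partition loop by one stable sort on the priority
-- predicate plus a slice (idiomatic; same return value, no speed claim).

-- ===== PORT A =====
def pvPriorityWords : List String := ["start", "create", "establish", "practice", "implement"]

-- `any(word in guide.lower() for word in priority_words)`
def pvIsPriority (guide : String) : Bool :=
  pvPriorityWords.any (fun word => PySem.Str.isIn word (PySem.Str.lower guide))

def prioritize_guidance_py (guidance : List String) : List String :=
  -- the for-loop over `guidance` with the two accumulators (prioritized, remaining)
  let pr : List String × List String :=
    guidance.foldl
      (fun acc guide =>
        if pvIsPriority guide then (acc.1 ++ [guide], acc.2)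
        else (acc.1, acc.2 ++ [guide]))
      ([], [])
  PySem.List.slice (pr.1 ++ pr.2) none (some 7)

-- ===== PORT B =====
-- key(g) = not any(w in g.lower() ...): False (priority) < True, modelled as 0 < 1
def pvKey (g : String) : Nat :=
  if pvPriorityWords.any (fun w => PySem.Str.isIn w (PySem.Str.lower g)) then 0 else 1

def prioritize_guidance_py_alt (guidance : List String) : List String :=
  PySem.List.slice (PySem.List.sorted guidance pvKey) none (some 7)

-- ===== PRECONDITION & SPEC =====
def Spec_prioritize_guidance_py (guidance : List String) (out : List String) : Prop := out = prioritize_guidance_py_alt guidance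
instance (guidance : List String) (out : List String) : Decidable (Spec_prioritize_guidance_py guidance out) := by unfold Spec_prioritize_guidance_py; infer_instance

-- ===== CLAIM (what is proved, stated in full; the proofs are below) =====
def Claim_equal_prioritize_guidance_py : Prop := ∀ (guidance : List String), Dom_prioritize_guidance_py guidance → Spec_prioritize_guidance_py guidance (prioritize_guidance_py guidance)

-- ===== LEMMAS AND PROOFS =====

theorem pvKey_eq (g : String) : pvKey g = if pvIsPriority g then 0 else 1 := rfl

-- inserting a priority element into (priority block ++ rest) lands between the blocks
theorem pv_insert_pri (x : String) (hx : pvIsPriority x = true) :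
    ∀ (P R : List String), (∀ p ∈ P, pvIsPriority p = true) → (∀ r ∈ R, pvIsPriority r = false) →
    PySem.List.insertBy (fun a b => decide (pvKey a < pvKey b)) x (P ++ R) = P ++ x :: R := by
  intro P
  induction P with
  | nil =>
    intro R _ hR
    cases R with
    | nil => rfl
    | cons r rs =>
      simp only [List.nil_append, PySem.List.insertBy]
      have : pvIsPriority r = false := hR r (by simp)
      simp [pvKey_eq, hx, this]
  | cons p ps ih =>
    intro R hP hR
    have hp : pvIsPriority p = true := hP p (by simp)
    simp only [List.cons_append, PySem.List.insertBy]
    rw [if_neg (by simp [pvKey_eq, hx, hp])]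
    simp only [List.cons.injEq, true_and]
    exact ih R (fun q hq => hP q (by simp [hq])) hR

-- inserting a non-priority element appends it at the end
theorem pv_insert_nonpri (x : String) (hx : pvIsPriority x = false) (ys : List String) :
    PySem.List.insertBy (fun a b => decide (pvKey a < pvKey b)) x ys = ys ++ [x] := by
  apply PySem.List.insertBy_of_forall_not_before
  intro y _
  simp only [pvKey_eq, hx, decide_eq_false_iff_not, not_lt]
  by_cases h : pvIsPriority y = true <;> simp [h]

-- B's insertion-sort fold, started on a partitioned accumulator, keeps it partitioned
theorem pv_fold_sorted (xs : List String) :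
    ∀ (P R : List String), (∀ p ∈ P, pvIsPriority p = true) → (∀ r ∈ R, pvIsPriority r = false) →
    List.foldl (fun acc x => PySem.List.insertBy (fun a b => decide (pvKey a < pvKey b)) x acc) (P ++ R) xs
      = (P ++ xs.filter pvIsPriority) ++ (R ++ xs.filter (fun g => !pvIsPriority g)) := by
  induction xs with
  | nil => intro P R _ _; simp
  | cons x xs ih =>
    intro P R hP hR
    by_cases hx : pvIsPriority x = true
    · simp only [List.foldl_cons, pv_insert_pri x hx P R hP hR]
      have : P ++ x :: R = (P ++ [x]) ++ R := by simp
      rw [this, ih (P ++ [x]) R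
        (fun p hp => by
          rcases List.mem_append.mp hp with h | h
          · exact hP p h
          · rw [List.mem_singleton.mp h]; exact hx)
        hR]
      simp [hx]
    · have hx' : pvIsPriority x = false := by simpa using hx
      simp only [List.foldl_cons, pv_insert_nonpri x hx' (P ++ R)]
      rw [List.append_assoc, ih P (R ++ [x]) hP
        (fun r hr => by
          rcases List.mem_append.mp hr with h | h
          · exact hR r h
          · rw [List.mem_singleton.mp h]; exact hx')]
      simp [hx']

theorem pv_sorted_eq_partition (guidance : List String) :
    PySem.List.sorted guidance pvKey
      = guidance.filter pvIsPriority ++ guidance.filter (fun g => !pvIsPriority g) := by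
  rw [PySem.List.sorted_eq_foldl_insertBy]
  have := pv_fold_sorted guidance [] [] (by simp) (by simp)
  simpa using this

-- A's two-accumulator loop computes the two filters
theorem pv_foldA (xs : List String) :
    ∀ (P R : List String),
    List.foldl
      (fun (acc : List String × List String) guide =>
        if pvIsPriority guide then (acc.1 ++ [guide], acc.2) else (acc.1, acc.2 ++ [guide]))
      (P, R) xs
      = (P ++ xs.filter pvIsPriority, R ++ xs.filter (fun g => !pvIsPriority g)) := by
  induction xs with
  | nil => intro P R; simp
  | cons x xs ih =>
    intro P R
    by_cases hx : pvIsPriority x = true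
    · simp [hx, ih]
    · have hx' : pvIsPriority x = false := by simpa using hx
      simp [hx', ih]

-- ===== VERDICT (by name: the statement is the Claim_ definition above) =====
theorem prioritize_guidance_py_spec : Claim_equal_prioritize_guidance_py := by
  intro guidance _
  unfold Spec_prioritize_guidance_py prioritize_guidance_py prioritize_guidance_py_alt
  rw [pv_sorted_eq_partition, pv_foldA]
  simp
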